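-- pv_equiv track=rewrite | github.com/GauthamAjayKannan/guvi | hashsum.py | calc
-- ===== SOURCE A (Python) =====
-- def calc(a):
--    u=a[:a.index("#")]
--    s=0
--    r=""
--    for i in a:
--         if i.isnumeric():
--             r=r+i
--         elif r!="":
--             s=s+int(r)
--             r=""
--    if r.isnumeric():
--       s=s+int(r)
--    return u,s
-- ===== SOURCE B (Python) =====
-- def calc(a):
--     u = a[:a.index("#")]
--     spaced = "".join(c if c.isnumeric() else " " for c in a)
--     return u, sum(int(w) for w in spaced.split())
-- ===== Notes on version B (the rewrite author's own statement) =====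
-- stated objective: idiomatic
-- what changed: Replaces A's explicit run-accumulator state machine (pending digit string, flush on boundary, trailing flush) with a translate-split-sum pipeline: map every non-numeric character to a space, str.split() yields exactly the maximal numeric runs, and the result is sum(int(w)) over them.
import Mathlib
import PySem

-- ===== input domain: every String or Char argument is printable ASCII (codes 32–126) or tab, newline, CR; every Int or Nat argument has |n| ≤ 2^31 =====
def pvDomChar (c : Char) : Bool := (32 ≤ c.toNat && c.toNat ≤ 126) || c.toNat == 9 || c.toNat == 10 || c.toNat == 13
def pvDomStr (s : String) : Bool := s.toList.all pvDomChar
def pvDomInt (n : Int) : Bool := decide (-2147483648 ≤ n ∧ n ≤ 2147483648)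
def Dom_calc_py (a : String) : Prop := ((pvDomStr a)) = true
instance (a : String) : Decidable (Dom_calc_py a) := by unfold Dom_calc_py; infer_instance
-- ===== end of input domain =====

-- B replaces A's run-accumulator state machine by an idiomatic translate/split/sum pipeline (same cost).
-- On the stated ASCII domain str.isnumeric coincides with '0'..'9', ported as PySem.Chars.isdigit (exact there).

-- ===== PORT A =====
def calc_py (a : String) : String × Int :=
  let cs := a.toList
  let u := String.ofList (PySem.List.slice cs none (some (PySem.Chars.find cs ['#'])))  -- a[:a.index("#")]; Pre_ puts '#' in a
  let sr := cs.foldl (fun (p : Int × List Char) i =>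
      if PySem.Chars.isdigit i then (p.1, p.2 ++ [i])          -- i.isnumeric(): exact on the ASCII domain
      else if p.2 ≠ [] then (p.1 + (PySem.Int.ofChars? p.2).getD 0, [])  -- int(r): r is a nonempty digit run, never a ValueError
      else p) (0, ([] : List Char))
  let s := if PySem.Chars.strIsdigit sr.2 then sr.1 + (PySem.Int.ofChars? sr.2).getD 0 else sr.1
  (u, s)

-- ===== PORT B =====
def calc_py_alt (a : String) : String × Int :=
  let cs := a.toList
  let u := String.ofList (PySem.List.slice cs none (some (PySem.Chars.find cs ['#'])))  -- a[:a.index("#")]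
  let spaced := cs.map (fun c => if PySem.Chars.isdigit c then c else ' ')  -- c.isnumeric(): exact on the ASCII domain
  let words := PySem.Chars.split₀ spaced                                    -- .split()
  (u, words.foldl (fun s w => s + (PySem.Int.ofChars? w).getD 0) 0)         -- sum(int(w) …): each w a nonempty digit run, no ValueError

-- ===== PRECONDITION & SPEC =====
-- Pre_ excludes exactly the strings without '#', on which Python A (and B) raises ValueError from a.index("#").
def Pre_calc_py (a : String) : Prop := '#' ∈ a.toList
instance (a : String) : Decidable (Pre_calc_py a) := by unfold Pre_calc_py; infer_instance
def pvWitness_calc_py : String := "1a2#3"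
def Spec_calc_py (a : String) (out : String × Int) : Prop := out = calc_py_alt a
instance (a : String) (out : String × Int) : Decidable (Spec_calc_py a out) := by unfold Spec_calc_py; infer_instance

-- ===== CLAIM (what is proved, stated in full; the proofs are below) =====
def Claim_equal_calc_py : Prop := ∀ (a : String), Dom_calc_py a → Pre_calc_py a → Spec_calc_py a (calc_py a)

-- ===== LEMMAS AND PROOFS =====

-- proof-side names for the two ports' loop bodies
def pvTr (c : Char) : Char := if PySem.Chars.isdigit c then c else ' '
def pvIntD (w : List Char) : Int := (PySem.Int.ofChars? w).getD 0
def pvStepA (p : Int × List Char) (i : Char) : Int × List Char :=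
  if PySem.Chars.isdigit i then (p.1, p.2 ++ [i])
  else if p.2 ≠ [] then (p.1 + (PySem.Int.ofChars? p.2).getD 0, [])
  else p
def pvFlush (p : Int × List Char) : Int :=
  if PySem.Chars.strIsdigit p.2 then p.1 + (PySem.Int.ofChars? p.2).getD 0 else p.1

lemma pv_not_space {c : Char} (h : PySem.Chars.isdigit c = true) : PySem.Chars.isspace c = false := by
  have h' : 48 ≤ c.toNat ∧ c.toNat ≤ 57 := by
    simp [PySem.Chars.isdigit, Char.le_def] at h
    exact ⟨UInt32.le_iff_toNat_le.1 h.1, UInt32.le_iff_toNat_le.1 h.2⟩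
  unfold PySem.Chars.isspace
  simp only [Bool.or_eq_false_iff, Bool.and_eq_false_iff, decide_eq_false_iff_not]
  omega

lemma pv_go_acc (xs : List Char) : ∀ (cur : List Char) (acc : List (List Char)),
    PySem.Chars.split₀.go xs cur acc = acc.reverse ++ PySem.Chars.split₀.go xs cur [] := by
  induction xs with
  | nil => intro cur acc; rw [PySem.Chars.split₀.go, PySem.Chars.split₀.go]; split_ifs <;> simp
  | cons c rest ih =>
    intro cur acc
    rw [PySem.Chars.split₀.go]
    conv_rhs => rw [PySem.Chars.split₀.go]
    split_ifs with h1 h2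
    · rw [ih [] acc, ih [] []]
    · rw [ih [] (cur.reverse :: acc), ih [] [cur.reverse]]; simp
    · rw [ih (c :: cur) acc, ih (c :: cur) []]

-- the loop invariant: flushing A's state after the remaining characters equals the sum of the
-- numeric words of the translated remainder, with the pending run r (reversed) as open word
lemma pv_main (cs : List Char) : ∀ (s : Int) (r : List Char), (∀ c ∈ r, PySem.Chars.isdigit c = true) →
    pvFlush (cs.foldl pvStepA (s, r))
      = s + ((PySem.Chars.split₀.go (cs.map pvTr) r.reverse []).map pvIntD).sum := by
  induction cs with
  | nil =>
    intro s r hr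
    rcases r with _ | ⟨c, r'⟩
    · simp [pvFlush, PySem.Chars.strIsdigit, PySem.Chars.split₀.go]
    · have hd : PySem.Chars.strIsdigit (c :: r') = true := by
        simp [PySem.Chars.strIsdigit]
        exact ⟨hr c (by simp), fun x hx => hr x (List.mem_cons_of_mem _ hx)⟩
      rw [List.foldl_nil, List.map_nil]
      rw [PySem.Chars.split₀.go]
      simp [pvFlush, hd, pvIntD]
  | cons i cs ih =>
    intro s r hr
    rw [List.foldl_cons, List.map_cons]
    by_cases hd : PySem.Chars.isdigit i = true
    · have hstep : pvStepA (s, r) i = (s, r ++ [i]) := by simp [pvStepA, hd]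
      have htr : pvTr i = i := by simp [pvTr, hd]
      rw [hstep, htr, PySem.Chars.split₀.go]
      rw [pv_not_space hd]
      simp only [if_neg Bool.false_ne_true]
      have := ih s (r ++ [i]) (by intro x hx; rcases List.mem_append.1 hx with h | h; exact hr x h; simp at h; subst h; exact hd)
      simpa using this
    · have htr : pvTr i = ' ' := by simp [pvTr, hd]
      have hsp : PySem.Chars.isspace ' ' = true := by decide
      rw [htr, PySem.Chars.split₀.go, if_pos hsp]
      rcases r with _ | ⟨c, r'⟩
      · have hstep : pvStepA (s, []) i = (s, []) := by simp [pvStepA, hd]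
        rw [hstep]
        simpa using ih s [] (by simp)
      · have hstep : pvStepA (s, c :: r') i = (s + (PySem.Int.ofChars? (c :: r')).getD 0, []) := by
          simp [pvStepA, hd]
        rw [hstep]
        rw [if_neg (by simp)]
        rw [pv_go_acc _ [] [(c :: r').reverse.reverse]]
        have := ih (s + (PySem.Int.ofChars? (c :: r')).getD 0) [] (by simp)
        simp only [List.reverse_nil] at this
        rw [this]
        simp [pvIntD]
        ring

theorem calc_py_main (a : String) : calc_py a = calc_py_alt a := by
  have h := pv_main a.toList 0 [] (by simp)
  simp only [List.reverse_nil] at h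
  show (String.ofList (PySem.List.slice a.toList none (some (PySem.Chars.find a.toList ['#']))),
        pvFlush (a.toList.foldl pvStepA (0, [])))
     = (String.ofList (PySem.List.slice a.toList none (some (PySem.Chars.find a.toList ['#']))),
        (PySem.Chars.split₀ (a.toList.map pvTr)).foldl (fun s w => s + pvIntD w) 0)
  rw [Prod.mk.injEq]
  refine ⟨rfl, ?_⟩
  rw [PySem.Chars.split₀]
  rw [show (fun (s : Int) (w : List Char) => s + pvIntD w) = (fun s w => s + (PySem.Int.ofChars? w).getD 0) from rfl]
  rw [PySem.List.foldl_add]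
  rw [h]
  rfl

-- ===== VERDICT (by name: the statement is the Claim_ definition above) =====
theorem calc_py_spec : Claim_equal_calc_py := by
  intro a _ _
  exact calc_py_main a
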